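-- pv_equiv track=rewrite | github.com/ybs1121/codinginterview | DI_study_algorithm/Hash/전화번호 목록.py | solution
-- ===== SOURCE A (Python) =====
-- def solution(phone_book):
--     answer = True
--     head = []
--     head2 = []
--     for i in phone_book:
--         head.append(i[0:2])
--     for i in phone_book:
--         head2.append(i[0:3])
--
--     head_set = set(head)
--     if len(head) != len(head_set):
--         answer = False
--     head_set2 = set(head2)
--     if len(head2) != len(head_set2):
--         answer = False
--     return answer
-- ===== SOURCE B (Python) =====
-- def solution(phone_book):
--     # Sort each prefix list and scan adjacent pairs for equality (instead of set-size comparison).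
--     for k in (2, 3):
--         ps = sorted(p[:k] for p in phone_book)
--         if any(a == b for a, b in zip(ps, ps[1:])):
--             return False
--     return True
-- ===== Notes on version B (the rewrite author's own statement) =====
-- stated objective: alternative
-- what changed: Duplicate prefixes are detected by sorting each prefix list and scanning adjacent pairs for equality (with early return), instead of building lists via append loops and comparing list length against set size.
import Mathlib
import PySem

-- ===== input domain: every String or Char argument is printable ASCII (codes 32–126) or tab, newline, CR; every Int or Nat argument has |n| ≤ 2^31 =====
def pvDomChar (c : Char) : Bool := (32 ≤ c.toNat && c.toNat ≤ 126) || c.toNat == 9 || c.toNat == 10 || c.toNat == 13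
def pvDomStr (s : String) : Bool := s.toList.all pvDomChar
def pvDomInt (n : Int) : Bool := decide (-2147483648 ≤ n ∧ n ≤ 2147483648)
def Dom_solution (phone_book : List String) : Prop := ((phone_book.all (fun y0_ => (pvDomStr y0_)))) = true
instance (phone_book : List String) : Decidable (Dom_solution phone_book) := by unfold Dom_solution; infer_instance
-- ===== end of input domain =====

-- B replaces A's list-vs-set-size duplicate test by sort-then-adjacent-scan with early return (alternative algorithm, same complexity class in practice).

-- ===== PORT A =====
def solution (phone_book : List String) : Bool :=
  let answer := true
  let head := phone_book.foldl (fun acc i => acc ++ [PySem.Str.slice i (some 0) (some 2)]) []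
  let head2 := phone_book.foldl (fun acc i => acc ++ [PySem.Str.slice i (some 0) (some 3)]) []
  let head_set := PySem.Set.ofList head
  let answer := if head.length ≠ head_set.length then false else answer
  let head_set2 := PySem.Set.ofList head2
  let answer := if head2.length ≠ head_set2.length then false else answer
  answer

-- ===== PORT B =====
-- any(a == b for a, b in zip(ps, ps[1:]))
def hasAdjDup : List String → Bool
  | a :: b :: t => a == b || hasAdjDup (b :: t)
  | _ => false

def solution_alt (phone_book : List String) : Bool :=
  if hasAdjDup (PySem.List.sorted (phone_book.map (fun p => PySem.Str.slice p none (some 2))) (fun x => x) false) then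
    false
  else if hasAdjDup (PySem.List.sorted (phone_book.map (fun p => PySem.Str.slice p none (some 3))) (fun x => x) false) then
    false
  else
    true

-- ===== PRECONDITION & SPEC =====
def Spec_solution (phone_book : List String) (out : Bool) : Prop := out = solution_alt phone_book
instance (phone_book : List String) (out : Bool) : Decidable (Spec_solution phone_book out) := by unfold Spec_solution; infer_instance

-- ===== CLAIM (what is proved, stated in full; the proofs are below) =====
def Claim_equal_solution : Prop := ∀ (phone_book : List String), Dom_solution phone_book → Spec_solution phone_book (solution phone_book)

-- ===== LEMMAS AND PROOFS =====

lemma foldl_append_map (xs : List String) (f : String → String) (acc : List String) :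
    xs.foldl (fun acc i => acc ++ [f i]) acc = acc ++ xs.map f := by
  induction xs generalizing acc with
  | nil => simp
  | cons h t ih => simp [List.foldl, ih]

lemma str_slice_zero (s : String) (b : Option Int) :
    PySem.Str.slice s (some 0) b = PySem.Str.slice s none b := by
  have h : (PySem.Str.slice s (some 0) b).toList = (PySem.Str.slice s none b).toList := by
    simp [PySem.Str.toList_slice]
  exact String.toList_inj.mp h

lemma len_ofList_eq_iff (xs : List String) :
    (PySem.Set.ofList xs).length = xs.length ↔ xs.Nodup := by
  have hperm : (PySem.Set.ofList xs).Perm xs.dedup := by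
    apply (List.perm_ext_iff_of_nodup (PySem.Set.nodup_ofList xs) xs.nodup_dedup).mpr
    intro x
    simp [PySem.Set.mem_ofList, List.mem_dedup]
  rw [hperm.length_eq]
  constructor
  · intro h
    have hsub := xs.dedup_sublist
    have := hsub.eq_of_length h
    rw [← this]; exact xs.nodup_dedup
  · intro h
    rw [List.dedup_eq_self.mpr h]

lemma hasAdjDup_false_iff (l : List String) (hp : l.Pairwise (· ≤ ·)) :
    hasAdjDup l = false ↔ l.Nodup := by
  induction l with
  | nil => simp [hasAdjDup]
  | cons a t ih =>
    cases t with
    | nil => simp [hasAdjDup]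
    | cons b t' =>
      have hp' : (b :: t').Pairwise (· ≤ ·) := hp.tail
      have hab : a ≤ b := (List.pairwise_cons.mp hp).1 b (by simp)
      have hle : ∀ x ∈ b :: t', a ≤ x := (List.pairwise_cons.mp hp).1
      have hble : ∀ x ∈ t', b ≤ x := (List.pairwise_cons.mp hp').1
      simp only [hasAdjDup, Bool.or_eq_false_iff, beq_eq_false_iff_ne, ih hp', List.nodup_cons]
      constructor
      · rintro ⟨hne, hnd⟩
        refine ⟨?_, hnd⟩
        intro hmem
        rcases List.mem_cons.mp hmem with h | h
        · exact hne h
        · exact hne (le_antisymm hab (le_trans (hble a h) (le_of_eq rfl)))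
      · rintro ⟨hnm, hnd⟩
        exact ⟨fun h => hnm (h ▸ List.mem_cons_self), hnd⟩

lemma hasAdjDup_sorted_iff (xs : List String) :
    hasAdjDup (PySem.List.sorted xs (fun x => x) false) = false ↔ xs.Nodup := by
  have hperm := PySem.List.sorted_perm (xs := xs) (key := fun x => x) (rev := false)
  have hp := PySem.List.sorted_pairwise (xs := xs) (key := fun x => x)
  rw [hasAdjDup_false_iff _ hp, hperm.nodup_iff]

-- ===== VERDICT (by name: the statement is the Claim_ definition above) =====
theorem solution_spec : Claim_equal_solution := by
  intro phone_book _
  unfold Spec_solution solution solution_alt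
  simp only [foldl_append_map, List.nil_append, str_slice_zero]
  set h2 := phone_book.map (fun i => PySem.Str.slice i none (some 2)) with hh2
  set h3 := phone_book.map (fun i => PySem.Str.slice i none (some 3)) with hh3
  have hl2 : h2.length = phone_book.length := by simp [hh2]
  have hl3 : h3.length = phone_book.length := by simp [hh3]
  have adjT : ∀ (l : List String), ¬ l.Nodup →
      hasAdjDup (PySem.List.sorted l (fun x => x) false) = true :=
    fun l hn => Bool.ne_false_iff.mp (mt (hasAdjDup_sorted_iff l).mp hn)
  have lenN : ∀ (l : List String), l.length = phone_book.length → ¬ l.Nodup →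
      ¬ phone_book.length = (PySem.Set.ofList l).length := by
    intro l hl hn h
    exact hn ((len_ofList_eq_iff l).mp (by omega))
  by_cases hn2 : h2.Nodup <;> by_cases hn3 : h3.Nodup
  · have t2 := (hasAdjDup_sorted_iff h2).mpr hn2
    have t3 := (hasAdjDup_sorted_iff h3).mpr hn3
    have l2 : (PySem.Set.ofList h2).length = h2.length := (len_ofList_eq_iff h2).mpr hn2
    have l3 : (PySem.Set.ofList h3).length = h3.length := (len_ofList_eq_iff h3).mpr hn3
    simp [t2, t3, l2, l3, hl2, hl3]
  · have d3 : h3.length ≠ (PySem.Set.ofList h3).length :=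
      fun h => hn3 ((len_ofList_eq_iff h3).mp h.symm)
    simp [adjT h3 hn3, d3]
  · have d2 : h2.length ≠ (PySem.Set.ofList h2).length :=
      fun h => hn2 ((len_ofList_eq_iff h2).mp h.symm)
    have l3 : (PySem.Set.ofList h3).length = h3.length := (len_ofList_eq_iff h3).mpr hn3
    simp [adjT h2 hn2, d2, l3]
  · have d3 : h3.length ≠ (PySem.Set.ofList h3).length :=
      fun h => hn3 ((len_ofList_eq_iff h3).mp h.symm)
    simp [adjT h2 hn2, d3]
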